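-- pv_equiv track=rewrite | github.com/LenaAbel/OPTIMISATION_PROJECT | main2.py | greedy_configuration_sensors
-- ===== SOURCE A (Python) =====
-- def greedy_configuration_sensors(zones, sensors):
--     # Convertir la liste des zones en un ensemble pour permettre des opérations rapides d'intersection et de différence
--     uncovered_zones = set(zones)  # Ensemble des zones non couvertes initialement
--     selected_sensors = []  # Liste pour stocker les capteurs sélectionnés
--
--     while uncovered_zones:
--         best_sensor, best_coverage = None, 0 # Initialiser le meilleur capteur et sa couverture
--
--         # Parcourir chaque capteur et les zones qu'il couvre
--         for sensor, zone_data in sensors.items():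
--             # Calculer combien de zones non couvertes sont couvertes par ce capteur
--             effective_coverage = len(uncovered_zones.intersection(zone_data))
--
--             # Si ce capteur couvre plus de zones non couvertes que le précédent meilleur
--             if effective_coverage > best_coverage:
--                 # Mettre à jour le meilleur capteur et sa couverture
--                 best_sensor, best_coverage = sensor, effective_coverage
--
--         # Si un capteur a été trouvé pour couvrir des zones non couvertes
--         if best_sensor:
--             # Mettre à jour les zones non couvertes en enlevant les zones couvertes par le meilleur capteur
--             uncovered_zones.difference_update(sensors[best_sensor])
--
--             # Ajouter le meilleur capteur à la liste des capteurs sélectionnés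
--             selected_sensors.append(best_sensor)
--
--         # Si aucun capteur ne peut couvrir des zones supplémentaires (ce qui ne devrait pas arriver si les données sont valides)
--         if best_sensor is None:
--             break
--
--     # Retourner la liste des capteurs sélectionnés qui couvrent toutes les zones
--     return selected_sensors
-- ===== SOURCE B (Python) =====
-- def greedy_configuration_sensors(zones, sensors):
--     # Inverted index zone -> sensors plus incrementally maintained coverage counts:
--     # each selection decrements the counts of every sensor sharing a newly covered zone,
--     # so a round is a scan of the counts instead of a set intersection per sensor.
--     uncovered = set(zones)
--     names = list(sensors)
--     cover = {}   # sensor -> zones it covers among the requested zones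
--     count = {}   # sensor -> how many of its zones are still uncovered
--     inv = {}     # zone -> sensors covering it
--     for name, zone_data in sensors.items():
--         zs = uncovered.intersection(zone_data)
--         cover[name] = zs
--         count[name] = len(zs)
--         for z in zs:
--             inv.setdefault(z, []).append(name)
--     selected = []
--     while uncovered:
--         best, best_count = None, 0
--         for name in names:
--             if count[name] > best_count:
--                 best, best_count = name, count[name]
--         if best is None:
--             break
--         for z in cover[best]:
--             if z in uncovered:
--                 uncovered.discard(z)
--                 for n in inv[z]:
--                     count[n] -= 1
--         selected.append(best)
--     return selected
-- ===== Notes on version B (the rewrite author's own statement) =====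
-- stated objective: faster
-- what changed: Instead of recomputing every sensor's intersection with the uncovered set in every round, B builds an inverted index zone->sensors once and maintains per-sensor coverage counts incrementally, decrementing them when a zone becomes covered, so each round is a plain scan of the counts (same first-maximum tie-break).
-- outside the precondition, e.g. on greedy_configuration_sensors([1], {'a': [1], '': [1]}): A returns ['a'], B returns ['a']
import Mathlib
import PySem

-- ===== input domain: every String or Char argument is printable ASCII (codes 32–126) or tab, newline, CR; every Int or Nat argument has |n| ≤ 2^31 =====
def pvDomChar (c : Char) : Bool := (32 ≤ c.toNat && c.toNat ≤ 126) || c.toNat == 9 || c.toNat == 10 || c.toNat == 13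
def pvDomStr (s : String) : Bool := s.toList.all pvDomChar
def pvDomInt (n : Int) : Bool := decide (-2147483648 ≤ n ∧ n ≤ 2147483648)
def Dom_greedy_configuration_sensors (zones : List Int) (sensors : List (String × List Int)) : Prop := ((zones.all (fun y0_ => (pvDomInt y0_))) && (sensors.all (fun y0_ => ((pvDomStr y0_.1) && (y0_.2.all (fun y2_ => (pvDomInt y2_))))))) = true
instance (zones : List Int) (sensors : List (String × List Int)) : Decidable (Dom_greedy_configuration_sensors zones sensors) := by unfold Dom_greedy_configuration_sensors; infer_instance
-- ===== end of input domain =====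

-- B replaces A's per-round set intersection over every sensor by an inverted index zone→sensors
-- with incrementally maintained coverage counts (decremented when a zone gets covered): faster rounds.

-- ===== PORT A =====
-- inner 'for sensor, zone_data in sensors.items()' argmax scan (first maximum wins, strict '>')
def pvAbest (u : PySem.Set Int) (sensors : List (String × List Int)) : Option String × Int :=
  sensors.foldl (fun b p =>
    let eff : Int := (PySem.Set.inter u p.2).length
    if eff > b.2 then (some p.1, eff) else b) (none, 0)

-- the 'while uncovered_zones:' loop; fuel |zones|+1 suffices under Pre_ (every selected round has
-- positive coverage, so it removes at least one uncovered zone); the 'best is the falsy "" name'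
-- state, where A's Python loops forever, is excluded by Pre_.
def pvAloop (sensors : List (String × List Int)) : Nat → PySem.Set Int → List String → List String
  | 0, _, acc => acc
  | fuel + 1, u, acc =>
    if u.isEmpty then acc
    else
      match pvAbest u sensors with
      | (some s, _) =>
          if s ≠ "" then   -- 'if best_sensor:' — Python truthiness of the name
            let zd := ((sensors.find? (fun p => p.1 == s)).map (fun p => p.2)).getD []  -- sensors[best_sensor]
            pvAloop sensors fuel (PySem.Set.diff u zd) (acc ++ [s])
          else pvAloop sensors fuel u acc  -- Python: no update, no break — the loop spins (outside Pre_)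
      | (none, _) => acc   -- 'if best_sensor is None: break'

-- the dict parameter is its entry list with duplicate keys collapsed Python-style (PySem.Dict.ofList)
def greedy_configuration_sensors (zones : List Int) (sensors : List (String × List Int)) : List String :=
  pvAloop (PySem.Dict.ofList sensors).items (zones.length + 1) (PySem.Set.ofList zones) []

-- ===== PORT B =====
-- one pass building cover (sensor → relevant zones), count (sensor → uncovered coverage) and the
-- inverted index inv (zone → sensors covering it)
def pvBinit (u0 : PySem.Set Int) (sensors : List (String × List Int)) :
    PySem.Dict String (List Int) × PySem.Dict String Int × PySem.Dict Int (List String) :=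
  sensors.foldl (fun st p =>
    let zs := PySem.Set.inter u0 p.2
    (st.1.insert p.1 zs, st.2.1.insert p.1 ((zs.length : Int)),
     zs.foldl (fun d z => d.modify z [] (fun l => l ++ [p.1])) st.2.2))
    (PySem.Dict.empty, PySem.Dict.empty, PySem.Dict.empty)

-- argmax scan over the maintained counts ('count[name]' is total: every name is a key of count)
def pvBbest (count : PySem.Dict String Int) (names : List String) : Option String × Int :=
  names.foldl (fun b n =>
    if count.getD n 0 > b.2 then (some n, count.getD n 0) else b) (none, 0)

def pvBloop (names : List String) (cover : PySem.Dict String (List Int))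
    (inv : PySem.Dict Int (List String)) :
    Nat → PySem.Set Int → PySem.Dict String Int → List String → List String
  | 0, _, _, acc => acc
  | fuel + 1, u, count, acc =>
    if u.isEmpty then acc
    else
      match pvBbest count names with
      | (some s, _) =>
          let st := (cover.getD s []).foldl
            (fun (q : PySem.Set Int × PySem.Dict String Int) z =>
              if q.1.contains z then
                (q.1.discard z,
                 (inv.getD z []).foldl (fun c n => c.modify n 0 (fun x => x - 1)) q.2)
              else q) (u, count)
          pvBloop names cover inv fuel st.1 st.2 (acc ++ [s])
      | (none, _) => acc

def greedy_configuration_sensors_alt (zones : List Int) (sensors : List (String × List Int)) : List String :=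
  let items := (PySem.Dict.ofList sensors).items   -- the dict parameter, duplicates collapsed
  let u0 := PySem.Set.ofList zones
  let t := pvBinit u0 items
  pvBloop (items.map (fun p => p.1)) t.1 t.2.2 (zones.length + 1) u0 t.2.1 []

-- ===== PRECONDITION & SPEC =====
-- Pre_ excludes only the inputs whose empty-string sensor covers some requested zone: whenever that
-- falsy name becomes a round's best, A's truthy 'if best_sensor:' guard skips both the update and the
-- break and the while-loop never terminates (on part of these inputs A still returns, "" never winning).
def Pre_greedy_configuration_sensors (zones : List Int) (sensors : List (String × List Int)) : Prop :=
  ∀ z ∈ (((PySem.Dict.ofList sensors).get? "").getD []), z ∉ zones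
instance (zones : List Int) (sensors : List (String × List Int)) : Decidable (Pre_greedy_configuration_sensors zones sensors) := by unfold Pre_greedy_configuration_sensors; infer_instance
def pvWitness_greedy_configuration_sensors : List Int × (List (String × List Int)) :=
  ([1, 2, 3], [("a", [1]), ("b", [1, 2]), ("c", [3])])

def Spec_greedy_configuration_sensors (zones : List Int) (sensors : List (String × List Int)) (out : List String) : Prop := out = greedy_configuration_sensors_alt zones sensors
instance (zones : List Int) (sensors : List (String × List Int)) (out : List String) : Decidable (Spec_greedy_configuration_sensors zones sensors out) := by unfold Spec_greedy_configuration_sensors; infer_instance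

-- ===== CLAIM (what is proved, stated in full; the proofs are below) =====
def Claim_equal_greedy_configuration_sensors : Prop := ∀ (zones : List Int) (sensors : List (String × List Int)), Dom_greedy_configuration_sensors zones sensors → Pre_greedy_configuration_sensors zones sensors → Spec_greedy_configuration_sensors zones sensors (greedy_configuration_sensors zones sensors)

-- ===== LEMMAS AND PROOFS =====

-- the three dicts pvBinit builds, separately
def pvCover (u0 : PySem.Set Int) (sensors : List (String × List Int)) : PySem.Dict String (List Int) :=
  sensors.foldl (fun d p => d.insert p.1 (PySem.Set.inter u0 p.2)) PySem.Dict.empty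
def pvCount0 (u0 : PySem.Set Int) (sensors : List (String × List Int)) : PySem.Dict String Int :=
  sensors.foldl (fun d p => d.insert p.1 (((PySem.Set.inter u0 p.2).length : Int))) PySem.Dict.empty
def pvInvIdx (u0 : PySem.Set Int) (sensors : List (String × List Int)) : PySem.Dict Int (List String) :=
  sensors.foldl (fun d p => (PySem.Set.inter u0 p.2).foldl (fun d z => d.modify z [] (fun l => l ++ [p.1])) d) PySem.Dict.empty

lemma foldl_triple {α β γ δ : Type} (l : List δ) (f : α → δ → α) (g : β → δ → β) (h : γ → δ → γ)
    (a : α) (b : β) (c : γ) :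
    l.foldl (fun st p => (f st.1 p, g st.2.1 p, h st.2.2 p)) (a, b, c) =
      (l.foldl f a, l.foldl g b, l.foldl h c) := by
  induction l generalizing a b c with
  | nil => rfl
  | cons x l ih => simpa using ih (f a x) (g b x) (h c x)

lemma pvBinit_eq (u0 : PySem.Set Int) (sensors : List (String × List Int)) :
    pvBinit u0 sensors = (pvCover u0 sensors, pvCount0 u0 sensors, pvInvIdx u0 sensors) := by
  unfold pvBinit pvCover pvCount0 pvInvIdx
  exact foldl_triple sensors (fun d p => d.insert p.1 (PySem.Set.inter u0 p.2))
    (fun d p => d.insert p.1 (((PySem.Set.inter u0 p.2).length : Int)))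
    (fun d p => (PySem.Set.inter u0 p.2).foldl (fun d z => d.modify z [] (fun l => l ++ [p.1])) d)
    PySem.Dict.empty PySem.Dict.empty PySem.Dict.empty

-- the loop invariant: uncovered is a set inside the original one, and count holds every
-- sensor's current effective coverage
def pvInvOK (u0 : List Int) (sensors : List (String × List Int)) (u : List Int)
    (count : PySem.Dict String Int) : Prop :=
  u.Nodup ∧ (∀ z ∈ u, z ∈ u0) ∧
    ∀ p ∈ sensors, count.getD p.1 0 = ((PySem.Set.inter u p.2).length : Int)

lemma getD_foldl_insert_not_mem {ν : Type} (f : String × List Int → ν)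
    (l : List (String × List Int)) (d : PySem.Dict String ν) (k : String) (dflt : ν)
    (hk : ∀ q ∈ l, q.1 ≠ k) :
    (l.foldl (fun d q => d.insert q.1 (f q)) d).getD k dflt = d.getD k dflt := by
  induction l generalizing d with
  | nil => rfl
  | cons a l ih =>
      simp only [List.foldl_cons]
      rw [ih _ (fun q hq => hk q (List.mem_cons_of_mem _ hq)),
        PySem.Dict.getD_insert_of_ne _ _ _ (Ne.symm (hk a (List.mem_cons_self)))]

lemma getD_foldl_insert_nodup {ν : Type} (f : String × List Int → ν)
    (l : List (String × List Int)) (d : PySem.Dict String ν) (dflt : ν)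
    (hnd : (l.map (fun p => p.1)).Nodup) {p : String × List Int} (hp : p ∈ l) :
    (l.foldl (fun d q => d.insert q.1 (f q)) d).getD p.1 dflt = f p := by
  induction l generalizing d with
  | nil => cases hp
  | cons a l ih =>
      simp only [List.map_cons, List.nodup_cons] at hnd
      rcases List.mem_cons.1 hp with rfl | hp'
      · simp only [List.foldl_cons]
        rw [getD_foldl_insert_not_mem _ _ _ _ _
            (fun q hq h => hnd.1 (by rw [← h]; exact List.mem_map_of_mem hq)),
          PySem.Dict.getD_insert_self]
      · simp only [List.foldl_cons]
        exact ih _ hnd.2 hp'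

lemma getD_foldl_modify_sub_one (l : List String) (d : PySem.Dict String Int) (v : String) :
    (l.foldl (fun c n => c.modify n 0 (fun x => x - 1)) d).getD v 0 =
      d.getD v 0 - (l.count v : Int) := by
  induction l generalizing d with
  | nil => simp
  | cons a l ih =>
      simp only [List.foldl_cons, List.count_cons]
      rw [ih, PySem.Dict.getD_modify]
      by_cases h : v = a
      · subst h
        rw [if_pos rfl]
        have hvv : (v == v) = true := BEq.rfl
        rw [hvv, if_pos rfl]
        push_cast
        ring
      · have hba : (a == v) = false := by simpa using fun hh => h hh.symm
        rw [if_neg h, hba]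
        simp

lemma filter_beq_of_nodup (xs : List Int) (h : xs.Nodup) (z : Int) :
    xs.filter (fun w => w == z) = if z ∈ xs then [z] else [] := by
  induction xs with
  | nil => simp
  | cons a xs ih =>
      simp only [List.nodup_cons] at h
      by_cases ha : a = z
      · subst ha
        rw [List.filter_cons_of_pos (by simp), if_pos List.mem_cons_self,
          List.filter_eq_nil_iff.2 (fun w hw => by
            simp only [beq_iff_eq]; rintro rfl; exact h.1 hw)]
      · have ha' : ¬ z = a := fun hh => ha hh.symm
        rw [List.filter_cons_of_neg (by simpa using ha), ih h.2]
        simp [List.mem_cons, ha']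

lemma foldl_modify_map (zs : List Int) (nm : String) (d : PySem.Dict Int (List String)) :
    zs.foldl (fun d z => d.modify z [] (fun l => l ++ [nm])) d =
      (zs.map (fun w => (w, nm))).foldl (fun d q => d.modify q.1 [] (fun l => l ++ [q.2])) d := by
  rw [List.foldl_map]

lemma pvInvIdx_getD (u0 : PySem.Set Int) (sensors : List (String × List Int)) (z : Int)
    (h0 : u0.Nodup) :
    (pvInvIdx u0 sensors).getD z [] =
      (sensors.filter (fun p => (PySem.Set.inter u0 p.2).contains z)).map (fun p => p.1) := by
  induction sensors using List.reverseRecOn with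
  | nil => rfl
  | append_singleton l p ih =>
      unfold pvInvIdx at *
      rw [List.foldl_append, List.foldl_cons, List.foldl_nil, foldl_modify_map,
        PySem.Dict.getD_foldl_modify_append, ih, List.filter_append, List.map_append]
      congr 1
      have hnd : (PySem.Set.inter u0 p.2).Nodup := h0.filter _
      rw [List.filter_map]
      rw [show ((fun q => q.1 == z) ∘ (fun w => (w, p.1))) = (fun w => w == z) from rfl]
      rw [filter_beq_of_nodup _ hnd z]
      by_cases hz : z ∈ PySem.Set.inter u0 p.2
      · rw [if_pos hz, List.filter_cons_of_pos
          (by simpa [PySem.Set.contains, List.contains_eq_mem] using hz), List.filter_nil]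
        rfl
      · rw [if_neg hz, List.filter_cons_of_neg
          (by simpa [PySem.Set.contains, List.contains_eq_mem] using hz), List.filter_nil]
        rfl

lemma countP_key_nodup (l : List (String × List Int))
    (hnd : (l.map (fun p => p.1)).Nodup) {n : String} {zd : List Int}
    (hp : (n, zd) ∈ l) (q : String × List Int → Bool) :
    l.countP (fun p => (p.1 == n) && q p) = if q (n, zd) then 1 else 0 := by
  induction l with
  | nil => cases hp
  | cons a l ih =>
      simp only [List.map_cons, List.nodup_cons] at hnd
      rcases List.mem_cons.1 hp with rfl | hp'
      · have hz : l.countP (fun p => (p.1 == n) && q p) = 0 :=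
          List.countP_eq_zero.2 (fun p hpl => by
            simp only [Bool.and_eq_true, beq_iff_eq, not_and]
            intro h _
            exact hnd.1 (by rw [← h]; exact List.mem_map.2 ⟨p, hpl, rfl⟩))
        rw [List.countP_cons, hz]
        by_cases hq : q (n, zd) <;> simp [hq]
      · have ha : a.1 ≠ n := fun h => hnd.1 (h ▸ List.mem_map_of_mem hp')
        rw [List.countP_cons, ih hnd.2 hp']
        simp [ha]

lemma inv_count (u0 : PySem.Set Int) (sensors : List (String × List Int))
    (h0 : u0.Nodup) (hnd : (sensors.map (fun p => p.1)).Nodup)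
    {n : String} {zd : List Int} (hp : (n, zd) ∈ sensors) (z : Int) :
    (((pvInvIdx u0 sensors).getD z []).count n : Int) =
      if (PySem.Set.inter u0 zd).contains z then 1 else 0 := by
  rw [pvInvIdx_getD _ _ _ h0]
  rw [List.count_eq_countP, List.countP_map, List.countP_filter]
  have hc := countP_key_nodup sensors hnd hp (fun p => (PySem.Set.inter u0 p.2).contains z)
  rw [show (List.countP (fun a => ((fun x => x == n) ∘ fun p => p.1) a &&
      (PySem.Set.inter u0 a.2).contains z) sensors) =
      (if (PySem.Set.inter u0 (n, zd).2).contains z then 1 else 0) from hc]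
  by_cases h : (PySem.Set.inter u0 zd).contains z <;> simp [h]

lemma length_filter_ne_of_nodup (xs : List Int) (h : xs.Nodup) (z : Int) :
    ((xs.filter (fun y => !(y == z))).length : Int) =
      (xs.length : Int) - (if z ∈ xs then 1 else 0) := by
  induction xs with
  | nil => simp
  | cons a xs ih =>
      simp only [List.nodup_cons] at h
      by_cases ha : a = z
      · subst ha
        rw [List.filter_cons_of_neg (by simp)]
        rw [List.filter_eq_self.2 (fun y hy => by simp; rintro rfl; exact h.1 hy)]
        simp [h.1]
      · rw [List.filter_cons_of_pos (by simpa using ha)]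
        simp only [List.length_cons, List.mem_cons]
        rw [Nat.cast_succ, ih h.2]
        have haz : ¬ z = a := fun hh => ha hh.symm
        by_cases hz : z ∈ xs <;> simp [hz, haz] <;> ring

lemma inter_discard (u zd : List Int) (z : Int) :
    PySem.Set.inter (PySem.Set.discard u z) zd = (PySem.Set.inter u zd).filter (fun y => !(y == z)) := by
  simp only [PySem.Set.inter, PySem.Set.discard, List.filter_filter]
  exact List.filter_congr (fun x _ => Bool.and_comm _ _)

-- one selection's removal loop: the uncovered set loses exactly cb's zones and the invariant survives
lemma inner_fold (u0 : PySem.Set Int) (sensors : List (String × List Int))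
    (h0 : u0.Nodup) (hnd : (sensors.map (fun p => p.1)).Nodup)
    (cb : List Int) (u : List Int) (count : PySem.Dict String Int)
    (hI : pvInvOK u0 sensors u count) :
    (cb.foldl (fun (q : PySem.Set Int × PySem.Dict String Int) z =>
        if q.1.contains z then
          (q.1.discard z,
           ((pvInvIdx u0 sensors).getD z []).foldl (fun c n => c.modify n 0 (fun x => x - 1)) q.2)
        else q) (u, count)).1 = u.filter (fun z => !cb.contains z) ∧
      pvInvOK u0 sensors (u.filter (fun z => !cb.contains z))
        ((cb.foldl (fun (q : PySem.Set Int × PySem.Dict String Int) z =>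
          if q.1.contains z then
            (q.1.discard z,
             ((pvInvIdx u0 sensors).getD z []).foldl (fun c n => c.modify n 0 (fun x => x - 1)) q.2)
          else q) (u, count)).2) := by
  induction cb generalizing u count with
  | nil =>
      constructor
      · simp
      · simpa using hI
  | cons z cb ih =>
      simp only [List.foldl_cons]
      by_cases hzu : PySem.Set.contains u z
      · have hzu' : z ∈ u := by
          simpa [PySem.Set.contains, List.contains_eq_mem] using hzu
        rw [if_pos hzu]
        have hnew : pvInvOK u0 sensors (PySem.Set.discard u z)
            (((pvInvIdx u0 sensors).getD z []).foldl
              (fun c n => c.modify n 0 (fun x => x - 1)) count) := by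
          refine ⟨hI.1.filter _, fun w hw => hI.2.1 w ((PySem.Set.mem_discard u z w).1 hw).1, ?_⟩
          intro p hp
          have hni : (PySem.Set.inter u p.2).Nodup := hI.1.filter _
          rw [getD_foldl_modify_sub_one, hI.2.2 p hp,
            inv_count u0 sensors h0 hnd (n := p.1) (zd := p.2) hp z,
            inter_discard, length_filter_ne_of_nodup _ hni z]
          have hmem : ((PySem.Set.inter u0 p.2).contains z = true) ↔ (z ∈ PySem.Set.inter u p.2) := by
            rw [PySem.Set.contains_iff, PySem.Set.mem_inter, PySem.Set.mem_inter]
            exact ⟨fun h => ⟨hzu', h.2⟩, fun h => ⟨hI.2.1 z hzu', h.2⟩⟩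
          by_cases hm : z ∈ PySem.Set.inter u p.2
          · rw [if_pos (hmem.2 hm), if_pos hm]
          · rw [if_neg (fun hc => hm (hmem.1 hc)), if_neg hm]
        have hrec := ih _ _ hnew
        have hfilt : (PySem.Set.discard u z).filter (fun y => !cb.contains y) =
            u.filter (fun y => !(z :: cb).contains y) := by
          simp only [PySem.Set.discard, List.filter_filter]
          refine List.filter_congr (fun x _ => ?_)
          by_cases hxz : x = z <;> by_cases hxc : x ∈ cb <;>
            simp [List.contains_eq_mem, List.mem_cons, hxz, hxc]
        rw [hfilt] at hrec
        exact hrec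
      · rw [if_neg hzu]
        have hrec := ih _ _ hI
        have hfilt : u.filter (fun y => !cb.contains y) =
            u.filter (fun y => !(z :: cb).contains y) := by
          refine List.filter_congr (fun x hx => ?_)
          have hxz : ¬ x = z := by
            rintro rfl
            exact hzu (by simpa [PySem.Set.contains, List.contains_eq_mem] using hx)
          simp [List.contains_eq_mem, List.mem_cons, hxz]
        rw [hfilt] at hrec
        exact hrec

lemma foldl_best_spec (u : PySem.Set Int) (l : List (String × List Int))
    (init : Option String × Int) {s : String} {c : Int} (h0 : 0 ≤ init.2)
    (h : l.foldl (fun b p =>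
      let eff : Int := (PySem.Set.inter u p.2).length
      if eff > b.2 then (some p.1, eff) else b) init = (some s, c)) :
    init = (some s, c) ∨
      (0 < c ∧ ∃ zd, (s, zd) ∈ l ∧ c = ((PySem.Set.inter u zd).length : Int)) := by
  induction l generalizing init with
  | nil => exact Or.inl h
  | cons p l ih =>
      simp only [List.foldl_cons] at h
      by_cases hc : ((PySem.Set.inter u p.2).length : Int) > init.2
      · rw [if_pos hc] at h
        rcases ih _ (Int.natCast_nonneg _) h with h1 | h1
        · right
          have hs : p.1 = s := by simpa using congrArg Prod.fst h1
          have hcv : ((PySem.Set.inter u p.2).length : Int) = c := congrArg Prod.snd h1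
          refine ⟨by omega, p.2, ?_, hcv.symm⟩
          rw [← hs]
          exact List.mem_cons_self
        · rcases h1 with ⟨hp, zd, hm, hv⟩
          exact Or.inr ⟨hp, zd, List.mem_cons_of_mem _ hm, hv⟩
      · rw [if_neg hc] at h
        rcases ih _ h0 h with h1 | h1
        · exact Or.inl h1
        · rcases h1 with ⟨hp, zd, hm, hv⟩
          exact Or.inr ⟨hp, zd, List.mem_cons_of_mem _ hm, hv⟩

lemma pvAbest_spec (u : PySem.Set Int) (sensors : List (String × List Int)) {s : String} {c : Int}
    (h : pvAbest u sensors = (some s, c)) :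
    0 < c ∧ ∃ zd, (s, zd) ∈ sensors ∧ c = ((PySem.Set.inter u zd).length : Int) := by
  unfold pvAbest at h
  rcases foldl_best_spec u sensors (none, 0) le_rfl h with h1 | h1
  · cases (by simpa using congrArg Prod.fst h1 : (none : Option String) = some s)
  · exact h1

lemma find?_key_nodup (l : List (String × List Int))
    (hnd : (l.map (fun p => p.1)).Nodup) {n : String} {zd : List Int} (hp : (n, zd) ∈ l) :
    l.find? (fun p => p.1 == n) = some (n, zd) := by
  induction l with
  | nil => cases hp
  | cons a l ih =>
      simp only [List.map_cons, List.nodup_cons] at hnd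
      rcases List.mem_cons.1 hp with rfl | hp'
      · exact List.find?_cons_of_pos (by simp)
      · have ha : (a.1 == n) = false := by
          simp only [beq_eq_false_iff_ne, ne_eq]
          intro hh
          exact hnd.1 (by rw [hh]; exact List.mem_map.2 ⟨(n, zd), hp', rfl⟩)
        rw [List.find?_cons_of_neg (by simp [ha]), ih hnd.2 hp']

lemma best_eq (u0 : List Int) (sensors : List (String × List Int)) (u : List Int)
    (count : PySem.Dict String Int) (hI : pvInvOK u0 sensors u count) :
    pvBbest count (sensors.map (fun p => p.1)) = pvAbest u sensors := by
  unfold pvBbest pvAbest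
  rw [List.foldl_map]
  refine PySem.List.foldl_congr_mem sensors _ _ (none, 0) (fun acc p hp => ?_)
  dsimp only
  rw [hI.2.2 p hp]

lemma loop_eq (u0 : PySem.Set Int) (sensors : List (String × List Int))
    (h0 : u0.Nodup) (hnd : (sensors.map (fun p => p.1)).Nodup)
    (hdis : ∀ zd, ("", zd) ∈ sensors → ∀ z ∈ zd, z ∉ u0) :
    ∀ (fuel : Nat) (u : List Int) (count : PySem.Dict String Int) (acc : List String),
      pvInvOK u0 sensors u count →
      pvAloop sensors fuel u acc =
        pvBloop (sensors.map (fun p => p.1)) (pvCover u0 sensors) (pvInvIdx u0 sensors)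
          fuel u count acc := by
  intro fuel
  induction fuel with
  | zero => intro u count acc _; rfl
  | succ fuel ih =>
      intro u count acc hI
      rw [pvAloop, pvBloop]
      by_cases hu : u.isEmpty
      · rw [if_pos hu, if_pos hu]
      · rw [if_neg hu, if_neg hu, best_eq u0 sensors u count hI]
        rcases hbest : pvAbest u sensors with ⟨os, c⟩
        cases os with
        | none => rfl
        | some s =>
            obtain ⟨hcpos, zd, hzd, hcval⟩ := pvAbest_spec u sensors hbest
            have hsne : s ≠ "" := by
              rintro rfl
              have hlen : 0 < (PySem.Set.inter u zd).length := by exact_mod_cast hcval ▸ hcpos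
              obtain ⟨z, hz⟩ := List.exists_mem_of_length_pos hlen
              have hzz := (PySem.Set.mem_inter u zd z).1 hz
              exact hdis zd hzd z hzz.2 (hI.2.1 z hzz.1)
            dsimp only
            rw [if_pos hsne, find?_key_nodup sensors hnd hzd,
              show ((Option.map (fun p => (p.2 : List Int)) (some (s, zd))).getD []) = zd from rfl]
            have hcov : (pvCover u0 sensors).getD s [] = PySem.Set.inter u0 zd := by
              have := getD_foldl_insert_nodup (fun q => PySem.Set.inter u0 q.2)
                sensors PySem.Dict.empty [] hnd hzd
              simpa using this
            rw [hcov]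
            have hin := inner_fold u0 sensors h0 hnd (PySem.Set.inter u0 zd) u count hI
            have hfeq : u.filter (fun x => !(List.contains (PySem.Set.inter u0 zd) x)) =
                PySem.Set.diff u zd := by
              refine List.filter_congr (fun x hx => ?_)
              have hmx : (List.contains (PySem.Set.inter u0 zd) x) = (zd.contains x) := by
                by_cases hxp : x ∈ zd <;>
                  simp [List.contains_eq_mem, PySem.Set.mem_inter, hI.2.1 x hx, hxp]
              rw [hmx]
              rfl
            rw [hin.1, hfeq]
            refine ih _ _ _ ?_
            rw [← hfeq]
            exact hin.2

-- ===== VERDICT (by name: the statement is the Claim_ definition above) =====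
theorem greedy_configuration_sensors_spec : Claim_equal_greedy_configuration_sensors := by
  intro zones sensors _hDom hPre
  unfold Spec_greedy_configuration_sensors
  unfold greedy_configuration_sensors greedy_configuration_sensors_alt
  show pvAloop (PySem.Dict.ofList sensors).items (zones.length + 1) (PySem.Set.ofList zones) [] =
      pvBloop ((PySem.Dict.ofList sensors).items.map (fun p => p.1))
        (pvBinit (PySem.Set.ofList zones) (PySem.Dict.ofList sensors).items).1
        (pvBinit (PySem.Set.ofList zones) (PySem.Dict.ofList sensors).items).2.2
        (zones.length + 1) (PySem.Set.ofList zones)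
        (pvBinit (PySem.Set.ofList zones) (PySem.Dict.ofList sensors).items).2.1 []
  rw [pvBinit_eq]
  have hk : (PySem.Dict.ofList sensors).keys.Nodup := PySem.Dict.nodup_keys_ofList sensors
  have hnd : ((PySem.Dict.ofList sensors).items.map (fun p => p.1)).Nodup := hk
  have hdis : ∀ zd, ("", zd) ∈ (PySem.Dict.ofList sensors).items →
      ∀ z ∈ zd, z ∉ PySem.Set.ofList zones := by
    intro zd hm z hz hzin
    have hg : (((PySem.Dict.ofList sensors).get? "").getD []) = zd := by
      rw [PySem.Dict.get?_of_mem_items _ hm hk]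
      rfl
    exact hPre z (hg ▸ hz) ((PySem.Set.mem_ofList zones z).1 hzin)
  refine loop_eq (PySem.Set.ofList zones) (PySem.Dict.ofList sensors).items
    (PySem.Set.nodup_ofList zones) hnd hdis (zones.length + 1) _ _ [] ?_
  refine ⟨PySem.Set.nodup_ofList zones, fun z hz => hz, ?_⟩
  intro p hp
  exact getD_foldl_insert_nodup (fun q => ((PySem.Set.inter (PySem.Set.ofList zones) q.2).length : Int))
    (PySem.Dict.ofList sensors).items PySem.Dict.empty 0 hnd hp
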